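-- pv_equiv track=rewrite | github.com/joaomeller11/-inteligencia-artificial | lights_out.py | alternar
-- ===== SOURCE A (Python) =====
-- import copy
--
-- movimentos = [(-1,0),(1,0),(0,-1),(0,1),(0,0)]
--
-- def alternar(tabuleiro, x, y):
--     n = len(tabuleiro)
--     novo = copy.deepcopy(tabuleiro)
--     for dx, dy in movimentos:
--         nx, ny = x+dx, y+dy
--         if 0 <= nx < n and 0 <= ny < n:
--             novo[nx][ny] ^= 1
--     return novo
-- ===== SOURCE B (Python) =====
-- def alternar(tabuleiro, x, y):
--     alvo = {(x, y), (x - 1, y), (x + 1, y), (x, y - 1), (x, y + 1)}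
--     return [[v ^ ((i, j) in alvo) for j, v in enumerate(linha)]
--             for i, linha in enumerate(tabuleiro)]
-- ===== Notes on version B (the rewrite author's own statement) =====
-- stated objective: idiomatic
-- what changed: Replaces deepcopy plus five in-place pokes with a precomputed set of the five target coordinates and one nested comprehension that builds a fresh board, deciding each cell independently; Pre_ excludes ragged boards, where A either raises IndexError or bounds the column by n while B bounds it by the row's own length — non-square boards are outside Lights Out's domain and either choice is defensible.
-- outside the precondition, e.g. on alternar([[0, 1, 0]], 0, 1): A returns [[1, 1, 0]], B returns [[1, 0, 1]]
import Mathlib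
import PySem

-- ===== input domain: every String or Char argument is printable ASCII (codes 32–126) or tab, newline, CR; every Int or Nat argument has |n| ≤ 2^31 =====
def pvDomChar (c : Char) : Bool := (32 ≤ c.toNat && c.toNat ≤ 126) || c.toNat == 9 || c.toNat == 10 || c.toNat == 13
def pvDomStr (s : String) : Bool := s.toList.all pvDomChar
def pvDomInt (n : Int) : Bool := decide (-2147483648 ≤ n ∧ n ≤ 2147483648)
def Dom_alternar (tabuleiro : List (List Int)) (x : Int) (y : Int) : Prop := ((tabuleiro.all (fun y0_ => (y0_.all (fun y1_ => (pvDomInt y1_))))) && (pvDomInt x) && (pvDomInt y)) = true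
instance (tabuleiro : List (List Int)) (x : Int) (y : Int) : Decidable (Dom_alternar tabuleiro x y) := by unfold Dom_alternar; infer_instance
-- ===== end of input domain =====

-- B replaces deepcopy plus five in-place pokes with a precomputed target set and one
-- nested comprehension building a fresh board (idiomatic; same cost). A mutates only its
-- own deepcopy, so no caller-visible mutation is at stake.


def movimentos : List (Int × Int) := [(-1,0),(1,0),(0,-1),(0,1),(0,0)]

-- ===== PORT A =====
-- the loop over movimentos becomes a foldl whose state is the board copy 'novo';
-- 'novo[nx][ny] ^= 1' is List.modify at the (nonnegative, in-range) indices
def alternar (tabuleiro : List (List Int)) (x : Int) (y : Int) : List (List Int) :=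
  let n : Int := tabuleiro.length
  movimentos.foldl (fun novo d =>
    let nx := x + d.1
    let ny := y + d.2
    if 0 ≤ nx ∧ nx < n ∧ 0 ≤ ny ∧ ny < n then
      novo.modify nx.toNat (fun row => row.modify ny.toNat (fun v => PySem.Int.bxor v 1))
    else novo) tabuleiro

-- ===== PORT B =====
-- the set literal 'alvo' becomes PySem.Set.ofList; the two comprehensions become maps
-- over PySem.List.enumerate; 'v ^ ((i, j) in alvo)' is an if over set membership
def alternar_alt (tabuleiro : List (List Int)) (x : Int) (y : Int) : List (List Int) :=
  let alvo : PySem.Set (Int × Int) :=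
    PySem.Set.ofList [(x, y), (x - 1, y), (x + 1, y), (x, y - 1), (x, y + 1)]
  (PySem.List.enumerate tabuleiro).map (fun p =>
    (PySem.List.enumerate p.2).map (fun q =>
      if (p.1, q.1) ∈ alvo then PySem.Int.bxor q.2 1 else q.2))

-- ===== PRECONDITION & SPEC =====
-- Pre_ excludes exactly the ragged (non-square) corners: boards where, for some toggle
-- target inside A's row range, the n-bound on the column disagrees with that row's real
-- length — there A either raises IndexError (row shorter than needed) or bounds the
-- column by n while B bounds it by the row's own length (row longer than n); non-square
-- boards are outside Lights Out's domain and either choice is defensible.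
def Pre_alternar (tabuleiro : List (List Int)) (x : Int) (y : Int) : Prop :=
  ∀ d ∈ movimentos,
    (0 ≤ x + d.1 ∧ x + d.1 < (tabuleiro.length : Int) ∧ 0 ≤ y + d.2) →
      (y + d.2 < (tabuleiro.length : Int) ↔
        y + d.2 < ((tabuleiro.getD (x + d.1).toNat []).length : Int))
instance (tabuleiro : List (List Int)) (x : Int) (y : Int) : Decidable (Pre_alternar tabuleiro x y) := by unfold Pre_alternar; infer_instance
def pvWitness_alternar : List (List Int) × Int × Int := ([[0,1],[1,0]], 0, 0)

def Spec_alternar (tabuleiro : List (List Int)) (x : Int) (y : Int) (out : List (List Int)) : Prop := out = alternar_alt tabuleiro x y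
instance (tabuleiro : List (List Int)) (x : Int) (y : Int) (out : List (List Int)) : Decidable (Spec_alternar tabuleiro x y out) := by unfold Spec_alternar; infer_instance

-- ===== CLAIM (what is proved, stated in full; the proofs are below) =====
def Claim_equal_alternar : Prop := ∀ (tabuleiro : List (List Int)) (x : Int) (y : Int), Dom_alternar tabuleiro x y → Pre_alternar tabuleiro x y → Spec_alternar tabuleiro x y (alternar tabuleiro x y)

-- ===== LEMMAS AND PROOFS =====

-- proof-side single step of A's loop, at an already-computed target pair
def pvStep (n : Int) (novo : List (List Int)) (p : Int × Int) : List (List Int) :=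
  if 0 ≤ p.1 ∧ p.1 < n ∧ 0 ≤ p.2 ∧ p.2 < n then
    novo.modify p.1.toNat (fun row => row.modify p.2.toNat (fun v => PySem.Int.bxor v 1))
  else novo

def pvGet2 (t : List (List Int)) (i j : Nat) : Int := (t.getD i []).getD j 0

lemma pvGet2_pvStep (n : Int) (t : List (List Int)) (p : Int × Int) (i j : Nat) :
    pvGet2 (pvStep n t p) i j =
      if p = ((i : Int), (j : Int)) ∧ (i : Int) < n ∧ (j : Int) < n ∧
          i < t.length ∧ j < (t.getD i []).length then
        PySem.Int.bxor (pvGet2 t i j) 1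
      else pvGet2 t i j := by
  unfold pvStep pvGet2
  split
  · rename_i hb
    obtain ⟨h1, h2, h3, h4⟩ := hb
    unfold List.getD
    simp only [List.getElem?_modify]
    rcases ht : t[i]? with _ | row
    · have hni : ¬ i < t.length := by simpa [List.getElem?_eq_none_iff] using ht
      simp [Prod.ext_iff, hni]
    · have hil : i < t.length := by
        obtain ⟨h, _⟩ := List.getElem?_eq_some_iff.mp ht; exact h
      simp only [Option.map_eq_map, Option.map_some, Option.getD_some]
      by_cases hpi : p.1.toNat = i
      · simp only [if_pos hpi, List.getElem?_modify]
        rcases hrj : row[j]? with _ | v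
        · have hnj : ¬ j < row.length := by simpa [List.getElem?_eq_none_iff] using hrj
          simp [Prod.ext_iff, hnj]
        · have hjl : j < row.length := by
            obtain ⟨h, _⟩ := List.getElem?_eq_some_iff.mp hrj; exact h
          simp only [Option.map_eq_map, Option.map_some, Option.getD_some]
          split_ifs with hc1 hc2 hc2 <;> simp_all [Prod.ext_iff]; omega
      · simp only [if_neg hpi]
        rw [if_neg]
        rintro ⟨rfl, -⟩
        simp at hpi
  · rename_i hb
    rw [if_neg]
    rintro ⟨rfl, hin, hjn, h, h'⟩
    exact hb ⟨by positivity, by simpa using hin, by positivity, by simpa using hjn⟩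

lemma length_pvStep (n : Int) (t : List (List Int)) (p : Int × Int) :
    (pvStep n t p).length = t.length := by
  unfold pvStep; split <;> simp

lemma rowlen_pvStep (n : Int) (t : List (List Int)) (p : Int × Int) (i : Nat) :
    ((pvStep n t p).getD i []).length = (t.getD i []).length := by
  unfold pvStep
  split
  · unfold List.getD
    simp only [List.getElem?_modify]
    cases t[i]? <;> simp
    split <;> simp
  · rfl

lemma length_foldl_pvStep (n : Int) (L : List (Int × Int)) (t : List (List Int)) :
    (L.foldl (pvStep n) t).length = t.length := by
  induction L generalizing t with
  | nil => rfl
  | cons p L ih => simp [List.foldl_cons, ih, length_pvStep]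

lemma rowlen_foldl_pvStep (n : Int) (L : List (Int × Int)) (t : List (List Int)) (i : Nat) :
    ((L.foldl (pvStep n) t).getD i []).length = (t.getD i []).length := by
  induction L generalizing t with
  | nil => rfl
  | cons p L ih => rw [List.foldl_cons, ih, rowlen_pvStep]

lemma pvGet2_foldl_pvStep (n : Int) (L : List (Int × Int)) (hnd : L.Nodup)
    (t : List (List Int)) (i j : Nat) :
    pvGet2 (L.foldl (pvStep n) t) i j =
      if ((i : Int), (j : Int)) ∈ L ∧ (i : Int) < n ∧ (j : Int) < n ∧
          i < t.length ∧ j < (t.getD i []).length then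
        PySem.Int.bxor (pvGet2 t i j) 1
      else pvGet2 t i j := by
  induction L generalizing t with
  | nil => simp
  | cons p L ih =>
    obtain ⟨hp, hnd'⟩ := List.nodup_cons.mp hnd
    rw [List.foldl_cons, ih hnd', length_pvStep, rowlen_pvStep, pvGet2_pvStep]
    by_cases hB : (i : Int) < n ∧ (j : Int) < n ∧ i < t.length ∧ j < (t.getD i []).length
    · by_cases hpe : p = ((i : Int), (j : Int))
      · subst hpe
        rw [if_neg (fun h => hp h.1), if_pos ⟨rfl, hB.1, hB.2.1, hB.2.2.1, hB.2.2.2⟩,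
            if_pos ⟨List.mem_cons_self, hB⟩]
      · by_cases hm : ((i : Int), (j : Int)) ∈ L
        · rw [if_pos ⟨hm, hB⟩, if_neg (fun h => hpe h.1),
              if_pos ⟨List.mem_cons_of_mem _ hm, hB⟩]
        · rw [if_neg (fun h => hm h.1), if_neg (fun h => hpe h.1), if_neg]
          rintro ⟨hc, -⟩
          rcases List.mem_cons.mp hc with h | h
          · exact hpe h.symm
          · exact hm h
    · rw [if_neg (fun h => hB ⟨h.2.1, h.2.2.1, h.2.2.2.1, h.2.2.2.2⟩),
          if_neg (fun h => hB ⟨h.2.1, h.2.2.1, h.2.2.2.1, h.2.2.2.2⟩),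
          if_neg (fun h => hB h.2)]

lemma pvTargets_nodup (x y : Int) :
    (movimentos.map (fun d => (x + d.1, y + d.2))).Nodup := by
  simp [movimentos, List.nodup_cons, List.mem_cons, Prod.ext_iff]

-- A's target list (moves applied to (x,y)) and B's literal target set hold the same pairs
lemma pvTargets_mem (x y : Int) (p : Int × Int) :
    p ∈ movimentos.map (fun d => (x + d.1, y + d.2)) ↔
      p ∈ [(x, y), (x - 1, y), (x + 1, y), (x, y - 1), (x, y + 1)] := by
  simp [movimentos, sub_eq_add_neg]
  tauto

theorem alternar_eq_alt (t : List (List Int)) (x : Int) (y : Int)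
    (hpre : Pre_alternar t x y) :
    alternar t x y = alternar_alt t x y := by
  have hA : alternar t x y =
      (movimentos.map (fun d => (x + d.1, y + d.2))).foldl (pvStep (t.length : Int)) t := by
    rw [List.foldl_map]; rfl
  have hnd := pvTargets_nodup x y
  have hlen : (alternar t x y).length = t.length := by
    rw [hA, length_foldl_pvStep]
  apply List.ext_getElem
  · simp [hlen, alternar_alt, PySem.List.length_enumerate]
  · intro i h1 h2
    have hit : i < t.length := by rwa [hlen] at h1
    have hrow : (alternar t x y)[i].length = t[i].length := by
      have := rowlen_foldl_pvStep (t.length : Int) (movimentos.map (fun d => (x + d.1, y + d.2))) t i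
      rw [← hA] at this
      rwa [List.getD_eq_getElem _ _ h1, List.getD_eq_getElem _ _ hit] at this
    apply List.ext_getElem
    · simp [hrow, alternar_alt, PySem.List.length_enumerate,
            PySem.List.getElem_enumerate]
    · intro j hj1 hj2
      have hjt : j < t[i].length := by rwa [hrow] at hj1
      have key := pvGet2_foldl_pvStep (t.length : Int)
        (movimentos.map (fun d => (x + d.1, y + d.2))) hnd t i j
      rw [← hA] at key
      unfold pvGet2 at key
      rw [List.getD_eq_getElem _ _ h1, List.getD_eq_getElem _ _ hj1,
          List.getD_eq_getElem _ _ hit, List.getD_eq_getElem _ _ hjt] at key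
      rw [key]
      simp only [alternar_alt, List.getElem_map, PySem.List.getElem_enumerate,
                 PySem.Set.mem_ofList, zero_add]
      rcases em (((i : Int), (j : Int)) ∈ movimentos.map (fun d => (x + d.1, y + d.2))) with hm | hm
      · -- inside Pre_, an in-board target column is also below n
        obtain ⟨d, hd, heq⟩ := List.mem_map.mp hm
        have hx : x + d.1 = (i : Int) := (Prod.mk.injEq _ _ _ _ ▸ heq).1
        have hy : y + d.2 = (j : Int) := (Prod.mk.injEq _ _ _ _ ▸ heq).2
        have hiff := hpre d hd ⟨by rw [hx]; positivity, by rw [hx]; exact_mod_cast hit,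
                                by rw [hy]; positivity⟩
        rw [hx, hy] at hiff
        have hrl : ((t.getD ((i : Int)).toNat []).length : Int) = (t[i].length : Int) := by
          rw [Int.toNat_natCast, List.getD_eq_getElem _ _ hit]
        have hjn : (j : Int) < (t.length : Int) := by
          rw [hiff, hrl]; exact_mod_cast hjt
        rw [if_pos ⟨hm, by exact_mod_cast hit, hjn, hit, hjt⟩,
            if_pos ((pvTargets_mem x y _).mp hm)]
      · rw [if_neg (fun h => hm h.1),
            if_neg (fun h => hm ((pvTargets_mem x y _).mpr h))]

-- ===== VERDICT (by name: the statement is the Claim_ definition above) =====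
theorem alternar_spec : Claim_equal_alternar := by
  intro t x y _ hpre
  exact alternar_eq_alt t x y hpre
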